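-- pv_equiv track=rewrite | github.com/georgymalkov/python | lesson4/4_6.py | b_cycle
-- ===== SOURCE A (Python) =====
-- from itertools import cycle, count
--
-- def b_cycle(n):
--     cycle_lst = []
--     i = 0
--     for el in cycle('1234'):
--
--         if i >= n:
--             break
--         else:
--             cycle_lst.append(el)
--             i += 1
--     return cycle_lst
-- ===== SOURCE B (Python) =====
-- def b_cycle(n):
--     # replicate whole '1234' blocks (ceil(n/4) of them), then truncate to n
--     return (list("1234") * ((n + 3) // 4))[:n]
-- ===== Notes on version B (the rewrite author's own statement) =====
-- stated objective: alternative
-- what changed: Replaces A's infinite cycle('1234') iterator with a counter and break by a staged block construction: list('1234') is replicated ceil(n/4) times by list multiplication and the result is sliced to length n; no per-element iterator or counter state exists.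
import Mathlib
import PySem

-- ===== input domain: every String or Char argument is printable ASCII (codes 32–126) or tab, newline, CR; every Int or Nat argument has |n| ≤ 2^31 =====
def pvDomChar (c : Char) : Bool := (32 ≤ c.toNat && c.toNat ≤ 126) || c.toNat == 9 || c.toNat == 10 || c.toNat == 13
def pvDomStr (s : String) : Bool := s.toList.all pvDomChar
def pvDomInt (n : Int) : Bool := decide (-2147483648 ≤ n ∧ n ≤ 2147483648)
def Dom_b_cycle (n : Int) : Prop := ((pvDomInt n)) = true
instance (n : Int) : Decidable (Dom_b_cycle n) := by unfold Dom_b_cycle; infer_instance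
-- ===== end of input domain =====

-- B replaces A's infinite cycle('1234') iterator + counter + break by a staged construction: replicate list('1234') ceil(n/4) times, then slice to n (alternative; same cost).


-- ===== PORT A =====
-- cycle('1234') is modelled by the remaining suffix of the four chars, refilled when exhausted;
-- the fuel n.toNat counts the iterations before 'i >= n' breaks the loop (exact: i counts appends).
def b_cycleAux : Nat → List Char → List String
  | 0, _ => []
  | Nat.succ k, c :: rest =>
      String.ofList [c] :: b_cycleAux k (if rest.isEmpty then ['1','2','3','4'] else rest)
  | Nat.succ k, [] => b_cycleAux k ['1','2','3','4']  -- unreachable: the cycle suffix is never empty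

def b_cycle (n : Int) : List String := b_cycleAux n.toNat ['1','2','3','4']

-- ===== PORT B =====
-- (list("1234") * ((n + 3) // 4))[:n] : Python list*k is [] for k ≤ 0, hence .toNat is exact.
def b_cycle_alt (n : Int) : List String :=
  PySem.List.slice
    (List.flatten (List.replicate (PySem.Int.floordiv (n + 3) 4).toNat ["1","2","3","4"]))
    none (some n)

-- ===== PRECONDITION & SPEC =====
def Spec_b_cycle (n : Int) (out : List String) : Prop := out = b_cycle_alt n
instance (n : Int) (out : List String) : Decidable (Spec_b_cycle n out) := by unfold Spec_b_cycle; infer_instance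

-- ===== CLAIM (what is proved, stated in full; the proofs are below) =====
def Claim_equal_b_cycle : Prop := ∀ (n : Int), Dom_b_cycle n → Spec_b_cycle n (b_cycle n)

-- ===== LEMMAS AND PROOFS =====

def pvCyc (j : Nat) : String := String.ofList [(['1','2','3','4']).getD (j % 4) ' ']

theorem pvAuxA : ∀ (k p : Nat), p < 4 →
    b_cycleAux k ((['1','2','3','4']).drop p) = (List.range k).map (fun j => pvCyc (p + j)) := by
  intro k
  induction k with
  | zero => intro p _; simp [b_cycleAux]
  | succ k ih =>
    intro p hp
    interval_cases p
    · have h := ih 1 (by omega)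
      simp only [List.drop] at h
      simp [b_cycleAux, h, List.range_succ_eq_map, List.map_map, Function.comp, pvCyc]
      intro a _
      have hidx : (1 + a) % 4 = (a + 1) % 4 := by omega
      rw [hidx]
    · have h := ih 2 (by omega)
      simp only [List.drop] at h
      simp [b_cycleAux, h, List.range_succ_eq_map, List.map_map, Function.comp, pvCyc]
      intro a _
      have hidx : (2 + a) % 4 = (1 + (a + 1)) % 4 := by omega
      rw [hidx]
    · have h := ih 3 (by omega)
      simp only [List.drop] at h
      simp [b_cycleAux, h, List.range_succ_eq_map, List.map_map, Function.comp, pvCyc]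
      intro a _
      have hidx : (3 + a) % 4 = (2 + (a + 1)) % 4 := by omega
      rw [hidx]
    · have h := ih 0 (by omega)
      simp only [List.drop] at h
      simp [b_cycleAux, h, List.range_succ_eq_map, List.map_map, Function.comp, pvCyc]
      intro a _
      have hidx : a % 4 = (3 + (a + 1)) % 4 := by omega
      rw [hidx]

theorem pvA_eq (n : Int) : b_cycle n = (List.range n.toNat).map pvCyc := by
  have h := pvAuxA n.toNat 0 (by omega)
  simpa [b_cycle] using h

theorem pvBlocks (k : Nat) :
    List.flatten (List.replicate k ["1","2","3","4"]) = (List.range (4 * k)).map pvCyc := by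
  induction k with
  | zero => simp
  | succ k ih =>
    rw [List.replicate_succ', List.flatten_append, ih]
    have h4 : 4 * (k + 1) = 4 * k + 1 + 1 + 1 + 1 := by omega
    rw [h4, List.range_succ, List.range_succ, List.range_succ, List.range_succ]
    have e0 : pvCyc (4 * k) = "1" := by unfold pvCyc; rw [Nat.mul_mod_right]; rfl
    have e1 : pvCyc (4 * k + 1) = "2" := by
      unfold pvCyc; have h : (4 * k + 1) % 4 = 1 := by omega
      rw [h]; rfl
    have e2 : pvCyc (4 * k + 1 + 1) = "3" := by
      unfold pvCyc; have h : (4 * k + 1 + 1) % 4 = 2 := by omega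
      rw [h]; rfl
    have e3 : pvCyc (4 * k + 1 + 1 + 1) = "4" := by
      unfold pvCyc; have h : (4 * k + 1 + 1 + 1) % 4 = 3 := by omega
      rw [h]; rfl
    simp [e0, e1, e2, e3]

theorem pvB_eq (n : Int) : b_cycle_alt n = (List.range n.toNat).map pvCyc := by
  unfold b_cycle_alt
  rw [pvBlocks]
  by_cases hn : 0 < n
  · obtain ⟨m, hm⟩ : ∃ m : Nat, n = (m : Int) := ⟨n.toNat, by omega⟩
    subst hm
    rw [PySem.List.slice_to_natCast, ← List.map_take, List.take_range]
    simp only [Int.toNat_natCast]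
    have hdiv : PySem.Int.floordiv ((m : Int) + 3) 4 = ((m : Int) + 3) / 4 :=
      PySem.Int.floordiv_eq_ediv_of_pos (by norm_num)
    rw [hdiv]
    have hmin : min m (4 * (((m : Int) + 3) / 4).toNat) = m := by omega
    rw [hmin]
  · have hk : (PySem.Int.floordiv (n + 3) 4).toNat = 0 := by
      have hdiv : PySem.Int.floordiv (n + 3) 4 = (n + 3) / 4 :=
        PySem.Int.floordiv_eq_ediv_of_pos (by norm_num)
      rw [hdiv]; omega
    have hn0 : n.toNat = 0 := by omega
    rw [hk, hn0]
    simp [PySem.List.slice]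

-- ===== VERDICT (by name: the statement is the Claim_ definition above) =====
theorem b_cycle_spec : Claim_equal_b_cycle := by
  intro n _
  unfold Spec_b_cycle
  rw [pvA_eq, pvB_eq]
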